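-- pv_equiv track=rewrite | github.com/khtad/pythonNHLPxPScraperAndDefenderAnalysis | data_processing.py | get_team_data
-- ===== SOURCE A (Python) =====
-- def get_team_data(game_data, team_id):
--     goals_for = 0
--     goals_against = 0
--
--     for event in game_data:
--         if event["event"] == "GOAL":
--             if event["description"].find(f"for {team_id}") != -1:
--                 goals_for += 1
--             elif event["description"].find(f"against {team_id}") != -1:
--                 goals_against += 1
--
--     unblocked_shots_against_count = unblocked_shots_against(game_data, team_id)
--     unblocked_shots_for_count = unblocked_shots_for(game_data, team_id)
--
--     team_data = {
--         "team_id": team_id,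
--         "goals_for": goals_for,
--         "goals_against": goals_against,
--         "unblocked_shots_against": unblocked_shots_against_count,
--         "unblocked_shots_for": unblocked_shots_for_count,
--     }
--
--     return team_data
--
-- def unblocked_shots_against(game_data, team_id):
--     unblocked_shots = 0
--
--     for event in game_data:
--         if event["event"] in ("SHOT", "MISS", "GOAL"):
--             # Check if the event is against the specified team
--             if event["description"].find(f"against {team_id}") != -1:
--                 unblocked_shots += 1
--
--     return unblocked_shots
--
-- def unblocked_shots_for(game_data, team_id):
--     unblocked_shots = 0
--
--     for event in game_data:
--         if event["event"] in ("SHOT", "MISS", "GOAL"):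
--             # Check if the event is for the specified team
--             if event["description"].find(f"for {team_id}") != -1:
--                 unblocked_shots += 1
--
--     return unblocked_shots
-- ===== SOURCE B (Python) =====
-- def get_team_data(game_data, team_id):
--     goals_for = goals_against = unblocked_for = unblocked_against = 0
--     for_tag = f"for {team_id}"
--     against_tag = f"against {team_id}"
--
--     for event in game_data:
--         kind = event["event"]
--         if kind == "GOAL":
--             if event["description"].find(for_tag) != -1:
--                 goals_for += 1
--             elif event["description"].find(against_tag) != -1:
--                 goals_against += 1
--         if kind in ("SHOT", "MISS", "GOAL"):
--             description = event["description"]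
--             if description.find(for_tag) != -1:
--                 unblocked_for += 1
--             if description.find(against_tag) != -1:
--                 unblocked_against += 1
--
--     return {
--         "team_id": team_id,
--         "goals_for": goals_for,
--         "goals_against": goals_against,
--         "unblocked_shots_against": unblocked_against,
--         "unblocked_shots_for": unblocked_for,
--     }
-- ===== Notes on version B (the rewrite author's own statement) =====
-- stated objective: simpler
-- what changed: A's three separate passes over game_data (one goal loop plus two helper functions for unblocked shots for/against) are merged into a single loop maintaining four counters, with the tag strings formatted once instead of per event.
import Mathlib
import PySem

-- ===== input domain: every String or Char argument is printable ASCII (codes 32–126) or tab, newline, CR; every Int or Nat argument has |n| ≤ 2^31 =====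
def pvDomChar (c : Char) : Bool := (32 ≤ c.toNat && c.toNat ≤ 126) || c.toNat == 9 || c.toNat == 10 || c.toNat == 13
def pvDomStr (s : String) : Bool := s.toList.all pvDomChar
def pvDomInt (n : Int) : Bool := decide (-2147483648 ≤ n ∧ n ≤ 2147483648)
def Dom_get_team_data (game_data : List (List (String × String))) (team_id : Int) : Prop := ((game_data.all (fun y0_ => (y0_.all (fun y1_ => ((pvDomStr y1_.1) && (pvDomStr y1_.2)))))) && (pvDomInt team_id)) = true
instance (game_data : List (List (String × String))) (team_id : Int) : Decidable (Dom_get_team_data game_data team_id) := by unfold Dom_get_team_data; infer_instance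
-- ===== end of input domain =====

-- B merges A's three passes (goal loop + two unblocked-shot helper functions) into one loop with four counters; return value only.

-- ===== PORT A =====
-- Python dict lookup event[k]: first matching key (Pre_ guarantees presence; default "" is never reached inside Pre_)
def pyItem (d : List (String × String)) (k : String) : String :=
  ((d.find? (fun kv => kv.1 == k)).map (·.2)).getD ""

-- one step of A's goals loop (tf/ta are the f-strings "for {team_id}" / "against {team_id}")
def gstepA (tf ta : String) (p : Int × Int) (event : List (String × String)) : Int × Int :=
  if pyItem event "event" == "GOAL" then
    if PySem.Str.find (pyItem event "description") tf ≠ -1 then (p.1 + 1, p.2)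
    else if PySem.Str.find (pyItem event "description") ta ≠ -1 then (p.1, p.2 + 1)
    else p
  else p

-- helper unblocked_shots_against
def unblocked_shots_against (game_data : List (List (String × String))) (team_id : Int) : Int :=
  game_data.foldl (fun u event =>
    if pyItem event "event" == "SHOT" || pyItem event "event" == "MISS" || pyItem event "event" == "GOAL" then
      if PySem.Str.find (pyItem event "description") ("against " ++ PySem.Int.toStr team_id) ≠ -1 then u + 1 else u
    else u) 0

-- helper unblocked_shots_for
def unblocked_shots_for (game_data : List (List (String × String))) (team_id : Int) : Int :=
  game_data.foldl (fun u event =>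
    if pyItem event "event" == "SHOT" || pyItem event "event" == "MISS" || pyItem event "event" == "GOAL" then
      if PySem.Str.find (pyItem event "description") ("for " ++ PySem.Int.toStr team_id) ≠ -1 then u + 1 else u
    else u) 0

def get_team_data (game_data : List (List (String × String))) (team_id : Int) : List (String × Int) :=
  let goals := game_data.foldl (gstepA ("for " ++ PySem.Int.toStr team_id) ("against " ++ PySem.Int.toStr team_id)) (0, 0)
  let usa := unblocked_shots_against game_data team_id
  let usf := unblocked_shots_for game_data team_id
  [("team_id", team_id), ("goals_for", goals.1), ("goals_against", goals.2),
   ("unblocked_shots_against", usa), ("unblocked_shots_for", usf)]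

-- ===== PORT B =====
-- one step of B's single loop over (goals_for, goals_against, unblocked_for, unblocked_against)
def stepB (tf ta : String) (s : Int × Int × Int × Int) (event : List (String × String)) : Int × Int × Int × Int :=
  let kind := pyItem event "event"
  let s1 : Int × Int × Int × Int :=
    if kind == "GOAL" then
      if PySem.Str.find (pyItem event "description") tf ≠ -1 then (s.1 + 1, s.2.1, s.2.2.1, s.2.2.2)
      else if PySem.Str.find (pyItem event "description") ta ≠ -1 then (s.1, s.2.1 + 1, s.2.2.1, s.2.2.2)
      else s
    else s
  if kind == "SHOT" || kind == "MISS" || kind == "GOAL" then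
    let description := pyItem event "description"
    let s2 : Int × Int × Int × Int :=
      if PySem.Str.find description tf ≠ -1 then (s1.1, s1.2.1, s1.2.2.1 + 1, s1.2.2.2) else s1
    if PySem.Str.find description ta ≠ -1 then (s2.1, s2.2.1, s2.2.2.1, s2.2.2.2 + 1) else s2
  else s1

def get_team_data_alt (game_data : List (List (String × String))) (team_id : Int) : List (String × Int) :=
  let for_tag := "for " ++ PySem.Int.toStr team_id
  let against_tag := "against " ++ PySem.Int.toStr team_id
  let s := game_data.foldl (stepB for_tag against_tag) (0, 0, 0, 0)
  [("team_id", team_id), ("goals_for", s.1), ("goals_against", s.2.1),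
   ("unblocked_shots_against", s.2.2.2), ("unblocked_shots_for", s.2.2.1)]

-- ===== PRECONDITION & SPEC =====
-- Pre_ excludes exactly the inputs where A raises KeyError: an event without an "event" key,
-- or a SHOT/MISS/GOAL event without a "description" key.
def Pre_get_team_data (game_data : List (List (String × String))) (team_id : Int) : Prop :=
  ∀ ev ∈ game_data,
    (ev.find? (fun kv => kv.1 == "event")).isSome = true ∧
    ((pyItem ev "event" = "SHOT" ∨ pyItem ev "event" = "MISS" ∨ pyItem ev "event" = "GOAL") →
      (ev.find? (fun kv => kv.1 == "description")).isSome = true)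
instance (game_data : List (List (String × String))) (team_id : Int) : Decidable (Pre_get_team_data game_data team_id) := by unfold Pre_get_team_data; infer_instance

def pvWitness_get_team_data : (List (List (String × String))) × Int :=
  ([[("event", "GOAL"), ("description", "Goal for 5")], [("event", "HIT")]], 5)

def Spec_get_team_data (game_data : List (List (String × String))) (team_id : Int) (out : List (String × Int)) : Prop := out = get_team_data_alt game_data team_id
instance (game_data : List (List (String × String))) (team_id : Int) (out : List (String × Int)) : Decidable (Spec_get_team_data game_data team_id out) := by unfold Spec_get_team_data; infer_instance

-- ===== CLAIM (what is proved, stated in full; the proofs are below) =====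
def Claim_equal_get_team_data : Prop := ∀ (game_data : List (List (String × String))) (team_id : Int), Dom_get_team_data game_data team_id → Pre_get_team_data game_data team_id → Spec_get_team_data game_data team_id (get_team_data game_data team_id)

-- ===== LEMMAS AND PROOFS =====

-- B's one-pass fold computes exactly (A's goal pair, A's for-count, A's against-count)
lemma foldB_eq (tf ta : String) (gd : List (List (String × String))) :
    ∀ (gf ga uf ua : Int),
      gd.foldl (stepB tf ta) (gf, ga, uf, ua) =
        ((gd.foldl (gstepA tf ta) (gf, ga)).1,
         (gd.foldl (gstepA tf ta) (gf, ga)).2,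
         gd.foldl (fun u event =>
            if pyItem event "event" == "SHOT" || pyItem event "event" == "MISS" || pyItem event "event" == "GOAL" then
              if PySem.Str.find (pyItem event "description") tf ≠ -1 then u + 1 else u
            else u) uf,
         gd.foldl (fun u event =>
            if pyItem event "event" == "SHOT" || pyItem event "event" == "MISS" || pyItem event "event" == "GOAL" then
              if PySem.Str.find (pyItem event "description") ta ≠ -1 then u + 1 else u
            else u) ua) := by
  induction gd with
  | nil => intro gf ga uf ua; rfl
  | cons ev rest ih =>
    intro gf ga uf ua
    simp only [List.foldl_cons, stepB, gstepA]
    split_ifs <;> simp_all <;> apply ih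

theorem get_team_data_spec : Claim_equal_get_team_data := by
  intro gd tid _ _
  unfold Spec_get_team_data get_team_data get_team_data_alt unblocked_shots_for unblocked_shots_against
  simp only [foldB_eq]
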